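-- pv_equiv track=rewrite | github.com/Qiskit/qiskit | qiskit/synthesis/stabilizer/stabilizer_circuit.py | _check_stabilizers_commutator
-- ===== SOURCE A (Python) =====
-- def _drop_sign(stabilizer: str) -> str:
--     """
--     Drop sign from stabilizer if it is present.
--
--     Args:
--         stabilizer (str): stabilizer string
--
--     Return:
--         str: stabilizer string without sign
--     """
--     if stabilizer[0] not in ["+", "-"]:
--         return stabilizer
--     if stabilizer[1] == "i":
--         return stabilizer[2:]
--     return stabilizer[1:]
--
-- def _check_stabilizers_commutator(s_1: str, s_2: str) -> bool:
--     """
--     Check if two stabilizers commute.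
--
--     Args:
--         s_1 (str): stabilizer string
--         s_1 (str): stabilizer string
--
--     Return:
--         bool: True if stabilizers commute, False otherwise.
--     """
--     prod = 1
--     for o1, o2 in zip(_drop_sign(s_1), _drop_sign(s_2)):
--         if o1 == "I" or o2 == "I":
--             continue
--         if o1 != o2:
--             prod *= -1
--     return prod == 1
-- ===== SOURCE B (Python) =====
-- def _strip_sign(stabilizer: str) -> str:
--     if stabilizer[0] in "+-":
--         return stabilizer[2:] if stabilizer[1] == "i" else stabilizer[1:]
--     return stabilizer
--
--
-- def _support(pauli: str) -> list:
--     """Sparse form of a Pauli string: (position, operator) for each non-identity position."""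
--     return [(i, op) for i, op in enumerate(pauli) if op != "I"]
--
--
-- def _check_stabilizers_commutator(s_1: str, s_2: str) -> bool:
--     sup_1 = _support(_strip_sign(s_1))
--     sup_2 = _support(_strip_sign(s_2))
--     anti = 0
--     i = j = 0
--     while i < len(sup_1) and j < len(sup_2):
--         p, op_1 = sup_1[i]
--         q, op_2 = sup_2[j]
--         if p < q:
--             i += 1
--         elif q < p:
--             j += 1
--         else:
--             if op_1 != op_2:
--                 anti += 1
--             i += 1
--             j += 1
--     return anti % 2 == 0
-- ===== Notes on version B (the rewrite author's own statement) =====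
-- stated objective: alternative
-- what changed: Replaces A's dense per-character compare-and-flip sign product over the zipped strings by a sparse representation: each sign-stripped stabilizer becomes a sorted list of (position, operator) pairs for its non-identity positions, and anticommuting overlaps are counted by a two-pointer merge of the two support lists, returning the parity of that count; Pre_ excludes only the empty or bare-sign strings on which A raises IndexError.
import Mathlib
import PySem

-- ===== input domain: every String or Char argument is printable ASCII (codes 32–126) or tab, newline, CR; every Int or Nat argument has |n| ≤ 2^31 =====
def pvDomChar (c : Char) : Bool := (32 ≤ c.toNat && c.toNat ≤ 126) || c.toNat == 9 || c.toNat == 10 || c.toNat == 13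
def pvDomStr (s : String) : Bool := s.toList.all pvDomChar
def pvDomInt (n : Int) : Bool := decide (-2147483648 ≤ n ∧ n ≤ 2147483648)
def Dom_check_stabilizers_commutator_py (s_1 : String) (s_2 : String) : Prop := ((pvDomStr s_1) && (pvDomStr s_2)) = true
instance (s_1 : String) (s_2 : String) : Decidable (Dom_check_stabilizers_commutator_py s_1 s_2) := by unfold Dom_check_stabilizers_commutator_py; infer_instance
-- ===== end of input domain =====

-- B replaces A's dense per-character sign-product loop over the zipped strings by a
-- sparse representation: each sign-stripped stabilizer becomes the sorted list of
-- (position, operator) pairs of its non-identity positions, and anticommuting overlaps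
-- are counted by a two-pointer merge of the two support lists (same cost, alternative
-- algorithm).

-- ===== PORT A =====
def drop_sign_py (stabilizer : String) : String :=
  match PySem.Str.pyGet? stabilizer 0 with
  | none => stabilizer   -- Python raises IndexError here; excluded by Pre_
  | some c0 =>
    if ¬ (c0 = '+' ∨ c0 = '-') then stabilizer
    else
      match PySem.Str.pyGet? stabilizer 1 with
      | none => stabilizer   -- Python raises IndexError here; excluded by Pre_
      | some c1 =>
        if c1 = 'i' then PySem.Str.slice stabilizer (some 2) none
        else PySem.Str.slice stabilizer (some 1) none

def check_stabilizers_commutator_py (s_1 : String) (s_2 : String) : Bool :=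
  let prod : Int :=
    (List.zip (drop_sign_py s_1).toList (drop_sign_py s_2).toList).foldl
      (fun prod oo =>
        if oo.1 = 'I' ∨ oo.2 = 'I' then prod
        else if oo.1 ≠ oo.2 then prod * (-1) else prod) 1
  prod == 1

-- ===== PORT B =====
def strip_sign_alt (stabilizer : String) : String :=
  match PySem.Str.pyGet? stabilizer 0 with
  | none => stabilizer   -- Python raises IndexError here; excluded by Pre_
  | some c0 =>
    if c0 = '+' ∨ c0 = '-' then
      match PySem.Str.pyGet? stabilizer 1 with
      | none => stabilizer   -- Python raises IndexError here; excluded by Pre_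
      | some c1 =>
        if c1 = 'i' then PySem.Str.slice stabilizer (some 2) none
        else PySem.Str.slice stabilizer (some 1) none
    else stabilizer

def support_alt (pauli : String) : List (Int × Char) :=
  (PySem.List.enumerate pauli.toList).filter (fun p => p.2 ≠ 'I')

-- the while loop over the two index pointers, as structural recursion on the suffixes
def merge_anti_alt : List (Int × Char) → List (Int × Char) → Int
  | (p, op_1) :: r_1, (q, op_2) :: r_2 =>
    if p < q then merge_anti_alt r_1 ((q, op_2) :: r_2)
    else if q < p then merge_anti_alt ((p, op_1) :: r_1) r_2
    else (if op_1 ≠ op_2 then 1 else 0) + merge_anti_alt r_1 r_2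
  | _, _ => 0
termination_by l1 l2 => l1.length + l2.length
decreasing_by all_goals (simp only [List.length_cons]; omega)

def check_stabilizers_commutator_py_alt (s_1 : String) (s_2 : String) : Bool :=
  let sup_1 := support_alt (strip_sign_alt s_1)
  let sup_2 := support_alt (strip_sign_alt s_2)
  PySem.Int.mod (merge_anti_alt sup_1 sup_2) 2 == 0

-- ===== PRECONDITION & SPEC =====
def pvSigned (l : List Char) : Bool :=
  match l with
  | [] => false
  | c :: rest =>
    if c = '+' ∨ c = '-' then
      match rest with
      | [] => false
      | _ => true
    else true

-- Pre_ excludes exactly the inputs on which Python A raises IndexError: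
-- an empty string, or a string that is only the sign character "+" or "-".
def Pre_check_stabilizers_commutator_py (s_1 : String) (s_2 : String) : Prop :=
  pvSigned s_1.toList = true ∧ pvSigned s_2.toList = true
instance (s_1 : String) (s_2 : String) : Decidable (Pre_check_stabilizers_commutator_py s_1 s_2) := by
  unfold Pre_check_stabilizers_commutator_py; infer_instance

def pvWitness_check_stabilizers_commutator_py : String × String := ("+XIZ", "-iYZI")

def Spec_check_stabilizers_commutator_py (s_1 : String) (s_2 : String) (out : Bool) : Prop := out = check_stabilizers_commutator_py_alt s_1 s_2
instance (s_1 : String) (s_2 : String) (out : Bool) : Decidable (Spec_check_stabilizers_commutator_py s_1 s_2 out) := by unfold Spec_check_stabilizers_commutator_py; infer_instance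

-- ===== CLAIM (what is proved, stated in full; the proofs are below) =====
def Claim_equal_check_stabilizers_commutator_py : Prop := ∀ (s_1 : String) (s_2 : String), Dom_check_stabilizers_commutator_py s_1 s_2 → Pre_check_stabilizers_commutator_py s_1 s_2 → Spec_check_stabilizers_commutator_py s_1 s_2 (check_stabilizers_commutator_py s_1 s_2)

-- ===== LEMMAS AND PROOFS =====

-- the sign-stripped body of a stabilizer, as a list of characters
def pvBody (l : List Char) : List Char :=
  match l with
  | [] => []
  | c :: rest =>
    if c = '+' ∨ c = '-' then
      match rest with
      | [] => []
      | c1 :: r => if c1 = 'i' then r else c1 :: r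
    else c :: rest

def pvAnti (p : Char × Char) : Bool := !decide (p.1 = 'I' ∨ p.2 = 'I') && decide (p.1 ≠ p.2)

theorem pv_bodyA (s : String) (h : pvSigned s.toList = true) :
    (drop_sign_py s).toList = pvBody s.toList := by
  unfold drop_sign_py
  rcases hl : s.toList with - | ⟨c, rest⟩
  · rw [hl] at h; simp [pvSigned] at h
  · by_cases hc : c = '+' ∨ c = '-'
    · rcases hr : rest with - | ⟨c1, r⟩
      · rw [hl, hr] at h; simp [pvSigned, hc] at h
      · by_cases hi : c1 = 'i' <;>
          simp [pysem, pvBody, hl, hr, hc, hi]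
    · simp [pysem, pvBody, hl, hc]

theorem pv_stripB (s : String) (h : pvSigned s.toList = true) :
    (strip_sign_alt s).toList = pvBody s.toList := by
  unfold strip_sign_alt
  rcases hl : s.toList with - | ⟨c, rest⟩
  · rw [hl] at h; simp [pvSigned] at h
  · by_cases hc : c = '+' ∨ c = '-'
    · rcases hr : rest with - | ⟨c1, r⟩
      · rw [hl, hr] at h; simp [pvSigned, hc] at h
      · by_cases hi : c1 = 'i' <;>
          simp [pysem, pvBody, hl, hr, hc, hi]
    · simp [pysem, pvBody, hl, hc]

theorem pv_foldA (pairs : List (Char × Char)) (p : Int) :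
    pairs.foldl
      (fun prod oo =>
        if oo.1 = 'I' ∨ oo.2 = 'I' then prod
        else if oo.1 ≠ oo.2 then prod * (-1) else prod) p
    = p * (-1) ^ (pairs.countP pvAnti) := by
  induction pairs generalizing p with
  | nil => simp
  | cons q rest ih =>
    simp only [List.foldl_cons, List.countP_cons]
    by_cases h1 : q.1 = 'I' ∨ q.2 = 'I'
    · rw [if_pos h1, ih]; simp [pvAnti, h1]
    · rw [if_neg h1]
      by_cases h2 : q.1 ≠ q.2
      · rw [if_pos h2, ih]; simp [pvAnti, h1, h2, pow_succ]
      · rw [if_neg h2, ih]; simp [pvAnti, h2]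

theorem pv_parity (k : Nat) : (((-1 : Int) ^ k == 1) : Bool) = ((k % 2 == 0) : Bool) := by
  rcases Nat.even_or_odd k with h | h
  · rw [Even.neg_one_pow h]
    simp [Nat.even_iff.mp h]
  · rw [Odd.neg_one_pow h]
    simp [Nat.odd_iff.mp h]

-- the support of a list of operators, offset by s
def pvSupp (l : List Char) (s : Int) : List (Int × Char) :=
  (PySem.List.enumerate l s).filter (fun p => p.2 ≠ 'I')

theorem pv_supp_nil (s : Int) : pvSupp [] s = [] := by
  simp [pvSupp, PySem.List.enumerate_nil]

theorem pv_supp_cons (c : Char) (l : List Char) (s : Int) :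
    pvSupp (c :: l) s = (if c ≠ 'I' then [(s, c)] else []) ++ pvSupp l (s + 1) := by
  by_cases hc : c = 'I' <;> simp [pvSupp, PySem.List.enumerate_cons, hc]

theorem pv_supp_gt (l : List Char) (s : Int) (p : Int × Char) (h : p ∈ pvSupp l (s + 1)) :
    s < p.1 := by
  have hm : p ∈ PySem.List.enumerate l (s + 1) := List.mem_of_mem_filter h
  rw [PySem.List.mem_enumerate_iff] at hm
  obtain ⟨k, hk, rfl⟩ := hm
  simp only
  omega

theorem pv_merge_nil_left (l : List (Int × Char)) : merge_anti_alt [] l = 0 := by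
  cases l <;> simp [merge_anti_alt]

theorem pv_merge_nil_right (l : List (Int × Char)) : merge_anti_alt l [] = 0 := by
  cases l <;> simp [merge_anti_alt]

theorem pv_merge_drop_right (A B : List (Int × Char)) (q : Int) (o : Char)
    (h : ∀ p ∈ A, q < p.1) :
    merge_anti_alt A ((q, o) :: B) = merge_anti_alt A B := by
  rcases A with - | ⟨⟨p, o1⟩, r⟩
  · rw [pv_merge_nil_left, pv_merge_nil_left]
  · have hq : q < p := h (p, o1) (by simp)
    rw [merge_anti_alt]
    rw [if_neg (by omega), if_pos hq]

theorem pv_merge_drop_left (A B : List (Int × Char)) (q : Int) (o : Char)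
    (h : ∀ p ∈ B, q < p.1) :
    merge_anti_alt ((q, o) :: A) B = merge_anti_alt A B := by
  rcases B with - | ⟨⟨p, o2⟩, r⟩
  · rw [pv_merge_nil_right, pv_merge_nil_right]
  · have hq : q < p := h (p, o2) (by simp)
    rw [merge_anti_alt]
    rw [if_pos hq]

theorem pv_merge_supp (l1 : List Char) :
    ∀ (l2 : List Char) (s : Int),
      merge_anti_alt (pvSupp l1 s) (pvSupp l2 s)
        = (((List.zip l1 l2).countP pvAnti : Nat) : Int) := by
  induction l1 with
  | nil => intro l2 s; rw [pv_supp_nil, pv_merge_nil_left]; simp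
  | cons c1 r1 ih =>
    intro l2 s
    rcases l2 with - | ⟨c2, r2⟩
    · rw [pv_supp_nil, pv_merge_nil_right]; simp
    · rw [pv_supp_cons, pv_supp_cons]
      have h1 := pv_supp_gt r1 s
      have h2 := pv_supp_gt r2 s
      by_cases hc1 : c1 = 'I' <;> by_cases hc2 : c2 = 'I'
      · simp only [hc1, hc2, ne_eq, not_true_eq_false, if_false, List.nil_append]
        rw [ih r2 (s + 1)]
        simp [pvAnti]
      · simp only [hc1, hc2, ne_eq, not_true_eq_false, not_false_eq_true, if_true,
          if_false, List.nil_append, List.singleton_append]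
        rw [pv_merge_drop_right _ _ _ _ h1, ih r2 (s + 1)]
        simp [pvAnti]
      · simp only [hc1, hc2, ne_eq, not_true_eq_false, not_false_eq_true, if_true,
          if_false, List.nil_append, List.singleton_append]
        rw [pv_merge_drop_left _ _ _ _ h2, ih r2 (s + 1)]
        simp [pvAnti]
      · simp only [hc1, hc2, ne_eq, not_false_eq_true, if_true, List.singleton_append]
        rw [merge_anti_alt, if_neg (by omega), if_neg (by omega), ih r2 (s + 1)]
        simp only [List.zip_cons_cons, List.countP_cons]
        by_cases he : c1 = c2 <;> simp [pvAnti, hc1, hc2, he, Int.add_comm]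

theorem pv_mod_two (k : Nat) :
    ((PySem.Int.mod ((k : Nat) : Int) 2 == 0) : Bool) = ((k % 2 == 0) : Bool) := by
  rw [show ((2:Int)) = ((2:Nat):Int) from rfl, PySem.Int.mod_natCast]
  rcases Nat.mod_two_eq_zero_or_one k with h | h <;> simp [h]

-- ===== VERDICT (by name: the statement is the Claim_ definition above) =====
theorem check_stabilizers_commutator_py_spec : Claim_equal_check_stabilizers_commutator_py := by
  intro s_1 s_2 _ hpre
  obtain ⟨h1, h2⟩ := hpre
  unfold Spec_check_stabilizers_commutator_py
  unfold check_stabilizers_commutator_py check_stabilizers_commutator_py_alt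
  rw [pv_bodyA s_1 h1, pv_bodyA s_2 h2]
  simp only [pv_foldA, one_mul]
  rw [pv_parity]
  show _ = (PySem.Int.mod (merge_anti_alt (support_alt (strip_sign_alt s_1))
      (support_alt (strip_sign_alt s_2))) 2 == 0)
  have hs : ∀ s : String, pvSigned s.toList = true →
      support_alt (strip_sign_alt s) = pvSupp (pvBody s.toList) 0 := by
    intro s hs
    unfold support_alt pvSupp
    rw [pv_stripB s hs]
  rw [hs s_1 h1, hs s_2 h2, pv_merge_supp, pv_mod_two]
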